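-- pv_equiv track=rewrite | github.com/zvi-code/z-valkey-search | analyze_rdb_structure.py | parse_hnsw_algorithm_protobuf
-- ===== SOURCE A (Python) =====
-- def read_varint(data, offset):
--     """Read a protobuf varint from data at offset"""
--     if offset >= len(data):
--         return None, offset
--
--     result = 0
--     shift = 0
--
--     while offset < len(data):
--         byte_val = data[offset]
--         offset += 1
--
--         result |= (byte_val & 0x7F) << shift
--
--         if (byte_val & 0x80) == 0:
--             break
--
--         shift += 7
--         if shift >= 64:  # Prevent infinite loop
--             return None, offset
--
--     return result, offset
--
-- def skip_protobuf_field(data, offset, wire_type):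
--     """Skip a protobuf field based on its wire type"""
--     if wire_type == 0:  # Varint
--         _, offset = read_varint(data, offset)
--     elif wire_type == 1:  # 64-bit
--         offset += 8
--     elif wire_type == 2:  # Length-delimited
--         length, offset = read_varint(data, offset)
--         if length is not None:
--             offset += length
--     elif wire_type == 5:  # 32-bit
--         offset += 4
--
--     return offset
--
-- def parse_hnsw_algorithm_protobuf(hnsw_data):
--     """Parse HNSWAlgorithm protobuf data"""
--     result = {
--         'm': 16,  # default
--         'ef_construction': 200,  # default
--         'ef_runtime': 10  # default
--     }
--
--     offset = 0
--     while offset < len(hnsw_data):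
--         tag, offset = read_varint(hnsw_data, offset)
--         if tag is None:
--             break
--
--         field_number = tag >> 3
--         wire_type = tag & 0x7
--
--         if field_number == 1 and wire_type == 0:  # m
--             value, offset = read_varint(hnsw_data, offset)
--             if value is not None:
--                 result['m'] = value
--         elif field_number == 2 and wire_type == 0:  # ef_construction
--             value, offset = read_varint(hnsw_data, offset)
--             if value is not None:
--                 result['ef_construction'] = value
--         elif field_number == 3 and wire_type == 0:  # ef_runtime
--             value, offset = read_varint(hnsw_data, offset)
--             if value is not None:
--                 result['ef_runtime'] = value
--         else:
--             offset = skip_protobuf_field(hnsw_data, offset, wire_type)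
--             if offset is None:
--                 break
--
--     return result
-- ===== SOURCE B (Python) =====
-- def _read_uvarint(data, offset):
--     """Collect the 7-bit chunks of a varint first, then combine them back-to-front."""
--     n = len(data)
--     if offset >= n:
--         return None, offset
--     chunks = []
--     while True:
--         b = data[offset]
--         offset += 1
--         chunks.append(b & 0x7F)
--         if not (b & 0x80):
--             break
--         if len(chunks) == 10:  # a 10th continuation byte would push the shift past 64
--             return None, offset
--         if offset >= n:
--             break
--     value = 0
--     for c in reversed(chunks):
--         value = (value << 7) | c
--     return value, offset
--
--
-- def _field_events(data):
--     """Yield one (field_number, wire_type, value) tuple per encoded field."""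
--     offset = 0
--     n = len(data)
--     while offset < n:
--         tag, offset = _read_uvarint(data, offset)
--         if tag is None:
--             return
--         fn, wt = tag >> 3, tag & 0x7
--         if wt == 0:
--             value, offset = _read_uvarint(data, offset)
--             yield (fn, wt, value)
--         else:
--             if wt == 1:
--                 offset += 8
--             elif wt == 2:
--                 length, offset = _read_uvarint(data, offset)
--                 if length is not None:
--                     offset += length
--             elif wt == 5:
--                 offset += 4
--             yield (fn, wt, None)
--
--
-- _FIELD_NAMES = {1: 'm', 2: 'ef_construction', 3: 'ef_runtime'}
--
--
-- def parse_hnsw_algorithm_protobuf(hnsw_data):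
--     """Parse HNSWAlgorithm protobuf data (tokenize, then interpret; last value wins)."""
--     result = {'m': 16, 'ef_construction': 200, 'ef_runtime': 10}
--     for fn, wt, value in _field_events(hnsw_data):
--         if wt == 0 and value is not None and fn in _FIELD_NAMES:
--             result[_FIELD_NAMES[fn]] = value
--     return result
-- ===== Notes on version B (the rewrite author's own statement) =====
-- stated objective: alternative
-- what changed: A's single interleaved parse loop (tag read, per-field if-chain, inline skip, shift-accumulated varints) is split into a field-event tokenizer that walks the bytes once emitting (field_number, wire_type, value) tuples, plus a table-driven interpreter folding those events over the defaults dict; varints are read by collecting 7-bit chunks and combining them back-to-front.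
import Mathlib
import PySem

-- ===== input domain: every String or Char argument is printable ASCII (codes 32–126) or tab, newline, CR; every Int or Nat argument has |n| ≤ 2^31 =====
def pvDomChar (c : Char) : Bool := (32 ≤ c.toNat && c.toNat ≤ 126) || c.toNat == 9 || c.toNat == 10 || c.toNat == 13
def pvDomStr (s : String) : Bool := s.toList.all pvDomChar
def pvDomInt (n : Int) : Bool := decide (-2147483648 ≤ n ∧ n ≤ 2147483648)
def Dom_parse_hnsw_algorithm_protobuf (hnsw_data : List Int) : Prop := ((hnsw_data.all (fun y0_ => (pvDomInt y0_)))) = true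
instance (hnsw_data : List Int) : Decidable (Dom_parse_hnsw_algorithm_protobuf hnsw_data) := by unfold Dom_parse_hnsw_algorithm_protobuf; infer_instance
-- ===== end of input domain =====

-- B re-decomposes A's one interleaved parse loop into a field-event tokenizer plus a
-- table-driven interpreter, and reads varints by collecting 7-bit chunks and folding them
-- back-to-front; objective: alternative decomposition, same return value (no speed claim).

-- ===== PORT A =====
-- Python offsets here are always nonnegative (they start at 0 and only grow), so offset and
-- shift are Nat.  Each while-loop is made structural with a `fuel` counter that is a pure
-- totality guard: every iteration consumes at least one byte, so starting fuel =
-- number of bytes still available is never exhausted and the Python loop is reproduced exactly.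

def readVarintLoop (data : List Int) (fuel : Nat) (offset : Nat) (result : Int) (shift : Nat) :
    Option Int × Nat :=
  match fuel with
  | 0 => (some result, offset)  -- only reached with offset ≥ data.length: the while-exit
  | fuel + 1 =>
    if h : offset < data.length then
      let byte_val := data[offset]
      let offset' := offset + 1
      let result' := PySem.Int.bor result ((PySem.Int.band byte_val 0x7F) <<< shift)
      if PySem.Int.band byte_val 0x80 == 0 then (some result', offset')
      else
        let shift' := shift + 7
        if shift' ≥ 64 then (none, offset')
        else readVarintLoop data fuel offset' result' shift'
    else (some result, offset)

def read_varint (data : List Int) (offset : Nat) : Option Int × Nat :=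
  if offset ≥ data.length then (none, offset)
  else readVarintLoop data (data.length - offset) offset 0 0

def skip_protobuf_field (data : List Int) (offset : Nat) (wire_type : Int) : Nat :=
  if wire_type == 0 then (read_varint data offset).2
  else if wire_type == 1 then offset + 8
  else if wire_type == 2 then
    -- a parsed varint is always ≥ 0, so `.toNat` is exact for `offset += length`
    match read_varint data offset with
    | (some length, o) => o + length.toNat
    | (none, o) => o
  else if wire_type == 5 then offset + 4
  else offset

def parseLoop (data : List Int) (fuel : Nat) (offset : Nat) (result : PySem.Dict String Int) :
    PySem.Dict String Int :=
  match fuel with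
  | 0 => result  -- only reached with offset ≥ data.length: the while-exit
  | fuel + 1 =>
    if offset < data.length then
      match read_varint data offset with
      | (none, _) => result
      | (some tag, o1) =>
        let field_number := tag >>> 3
        let wire_type := PySem.Int.band tag 7
        if field_number == 1 && wire_type == 0 then
          match read_varint data o1 with
          | (some value, o2) => parseLoop data fuel o2 (result.insert "m" value)
          | (none, o2) => parseLoop data fuel o2 result
        else if field_number == 2 && wire_type == 0 then
          match read_varint data o1 with
          | (some value, o2) => parseLoop data fuel o2 (result.insert "ef_construction" value)
          | (none, o2) => parseLoop data fuel o2 result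
        else if field_number == 3 && wire_type == 0 then
          match read_varint data o1 with
          | (some value, o2) => parseLoop data fuel o2 (result.insert "ef_runtime" value)
          | (none, o2) => parseLoop data fuel o2 result
        else parseLoop data fuel (skip_protobuf_field data o1 wire_type) result
    else result

def parse_hnsw_algorithm_protobuf (hnsw_data : List Int) : List (String × Int) :=
  (parseLoop hnsw_data hnsw_data.length 0
    (PySem.Dict.ofList [("m", 16), ("ef_construction", 200), ("ef_runtime", 10)])).items

-- ===== PORT B =====

def chunksLoop (data : List Int) (fuel : Nat) (offset : Nat) (chunks : List Int) :
    Option (List Int) × Nat :=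
  match fuel with
  | 0 => (some chunks, offset)  -- only reached with offset ≥ data.length
  | fuel + 1 =>
    if h : offset < data.length then
      let b := data[offset]
      let offset' := offset + 1
      let chunks' := chunks ++ [PySem.Int.band b 0x7F]
      if PySem.Int.band b 0x80 == 0 then (some chunks', offset')
      else if chunks'.length == 10 then (none, offset')
      else if offset' ≥ data.length then (some chunks', offset')
      else chunksLoop data fuel offset' chunks'
    else (some chunks, offset)  -- unreachable: the Python do-while is entered with offset < len

def chunksValue (chunks : List Int) : Int :=
  chunks.reverse.foldl (fun v c => PySem.Int.bor (v <<< (7 : Nat)) c) 0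

def read_uvarint (data : List Int) (offset : Nat) : Option Int × Nat :=
  if offset ≥ data.length then (none, offset)
  else
    match chunksLoop data (data.length - offset) offset [] with
    | (some cs, o) => (some (chunksValue cs), o)
    | (none, o) => (none, o)

def fieldEvents (data : List Int) (fuel : Nat) (offset : Nat) : List (Int × Int × Option Int) :=
  match fuel with
  | 0 => []  -- only reached with offset ≥ data.length: the while-exit
  | fuel + 1 =>
    if offset < data.length then
      match read_uvarint data offset with
      | (none, _) => []
      | (some tag, o1) =>
        let fn := tag >>> 3
        let wt := PySem.Int.band tag 7
        if wt == 0 then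
          match read_uvarint data o1 with
          | (value, o2) => (fn, wt, value) :: fieldEvents data fuel o2
        else
          let o2 :=
            if wt == 1 then o1 + 8
            else if wt == 2 then
              match read_uvarint data o1 with
              | (some length, o) => o + length.toNat
              | (none, o) => o
            else if wt == 5 then o1 + 4
            else o1
          (fn, wt, none) :: fieldEvents data fuel o2
    else []

def parse_hnsw_algorithm_protobuf_alt (hnsw_data : List Int) : List (String × Int) :=
  let names : PySem.Dict Int String :=
    PySem.Dict.ofList [(1, "m"), (2, "ef_construction"), (3, "ef_runtime")]
  let result : PySem.Dict String Int :=
    PySem.Dict.ofList [("m", 16), ("ef_construction", 200), ("ef_runtime", 10)]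
  ((fieldEvents hnsw_data hnsw_data.length 0).foldl (fun d ev =>
      if ev.2.1 == 0 then
        match ev.2.2 with
        | some value =>
          match names.get? ev.1 with
          | some nm => d.insert nm value
          | none => d
        | none => d
      else d) result).items

-- ===== PRECONDITION & SPEC =====
def Spec_parse_hnsw_algorithm_protobuf (hnsw_data : List Int) (out : List (String × Int)) : Prop := out = parse_hnsw_algorithm_protobuf_alt hnsw_data
instance (hnsw_data : List Int) (out : List (String × Int)) : Decidable (Spec_parse_hnsw_algorithm_protobuf hnsw_data out) := by unfold Spec_parse_hnsw_algorithm_protobuf; infer_instance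

-- ===== CLAIM (what is proved, stated in full; the proofs are below) =====
def Claim_equal_parse_hnsw_algorithm_protobuf : Prop := ∀ (hnsw_data : List Int), Dom_parse_hnsw_algorithm_protobuf hnsw_data → Spec_parse_hnsw_algorithm_protobuf hnsw_data (parse_hnsw_algorithm_protobuf hnsw_data)

-- ===== LEMMAS AND PROOFS =====

-- the value of a chunk list as an or of shifted 7-bit chunks (Nat side)
def numOr : List Nat → Nat
  | [] => 0
  | c :: t => c ||| (numOr t <<< 7)

def castChunks : List Nat → List Int
  | [] => []
  | c :: t => (c : Int) :: castChunks t

@[simp] theorem castChunks_length (cs : List Nat) : (castChunks cs).length = cs.length := by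
  induction cs with
  | nil => rfl
  | cons c t ih => simp [castChunks, ih]

theorem castChunks_append (cs : List Nat) (c : Nat) :
    castChunks (cs ++ [c]) = castChunks cs ++ [(c : Int)] := by
  induction cs with
  | nil => rfl
  | cons d t ih => simp [castChunks, ih]

theorem numOr_append (cs : List Nat) (c : Nat) :
    numOr (cs ++ [c]) = numOr cs ||| (c <<< (7 * cs.length)) := by
  induction cs with
  | nil => simp [numOr]
  | cons d t ih =>
    simp only [List.cons_append, numOr, ih, Nat.shiftLeft_or_distrib, ← Nat.shiftLeft_add,
      List.length_cons, Nat.mul_succ, Nat.lor_assoc]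

theorem chunksValue_cast (cs : List Nat) :
    chunksValue (castChunks cs) = ((numOr cs : Nat) : Int) := by
  induction cs with
  | nil => rfl
  | cons c t ih =>
    have hrev : (castChunks (c :: t)).reverse = (castChunks t).reverse ++ [(c : Int)] := by
      simp [castChunks]
    rw [chunksValue, hrev, List.foldl_append, List.foldl_cons, List.foldl_nil,
      ← chunksValue, ih]
    rw [numOr, ← Int.natCast_shiftLeft, PySem.Int.bor_natCast, Nat.lor_comm]

theorem band127_nonneg (b : Int) : 0 ≤ PySem.Int.band b 127 := by
  rw [PySem.Int.band_comm]; exact PySem.Int.band_nonneg_of_nonneg_left _ (by norm_num)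

theorem chunksLoop_stop (data : List Int) (fuel : Nat) (offset : Nat) (cs : List Int)
    (h : ¬ offset < data.length) :
    chunksLoop data fuel offset cs = (some cs, offset) := by
  cases fuel with
  | zero => rfl
  | succ fuel => rw [chunksLoop, dif_neg h]

theorem varloop_chunks (data : List Int) :
    ∀ fuel offset (cs : List Nat), cs.length ≤ 9 →
    readVarintLoop data fuel offset ((numOr cs : Nat) : Int) (7 * cs.length) =
      (match chunksLoop data fuel offset (castChunks cs) with
       | (some out, o) => (some (chunksValue out), o)
       | (none, o) => (none, o)) := by
  intro fuel
  induction fuel with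
  | zero =>
    intro offset cs _
    rw [readVarintLoop, chunksLoop]
    dsimp only
    rw [chunksValue_cast]
  | succ fuel ih =>
    intro offset cs h9
    by_cases h : offset < data.length
    · rw [readVarintLoop, dif_pos h, chunksLoop, dif_pos h]
      dsimp only
      have hb : PySem.Int.band data[offset] 127
          = (((PySem.Int.band data[offset] 127).toNat : Nat) : Int) :=
        Int.eq_natCast_toNat.mpr (band127_nonneg _)
      set c : Nat := (PySem.Int.band data[offset] 127).toNat with hc
      have hres : PySem.Int.bor ((numOr cs : Nat) : Int)
            (PySem.Int.band data[offset] 127 <<< (7 * cs.length))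
          = ((numOr (cs ++ [c]) : Nat) : Int) := by
        rw [hb, ← Int.natCast_shiftLeft, PySem.Int.bor_natCast, ← numOr_append]
      have hmap : castChunks cs ++ [PySem.Int.band data[offset] 127]
          = castChunks (cs ++ [c]) := by
        rw [hb, castChunks_append]
      rw [hres, hmap]
      split
      · -- no continuation bit: both return the finished value
        dsimp only
        rw [chunksValue_cast]
      · -- continuation byte: the shift guard ⟷ the 10-chunk guard
        by_cases h10 : cs.length = 9
        · rw [if_pos (by omega), if_pos (by simp [h10])]
        · rw [if_neg (by omega), if_neg (by simp; omega)]
          have harg : 7 * cs.length + 7 = 7 * (cs ++ [c]).length := by simp; ring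
          rw [harg, ih (offset + 1) (cs ++ [c]) (by simp; omega)]
          by_cases hend : offset + 1 ≥ data.length
          · rw [if_pos hend, chunksLoop_stop data fuel (offset + 1) _ (by omega)]
          · rw [if_neg hend]
    · rw [readVarintLoop, dif_neg h, chunksLoop, dif_neg h]
      dsimp only
      rw [chunksValue_cast]

theorem varint_eq (data : List Int) (offset : Nat) :
    read_varint data offset = read_uvarint data offset := by
  rw [read_varint, read_uvarint]
  split
  · rfl
  · have := varloop_chunks data (data.length - offset) offset [] (by simp)
    simpa [numOr, castChunks] using this

-- the interpreter step of B, named for the proofs only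
def stepB (d : PySem.Dict String Int) (ev : Int × Int × Option Int) : PySem.Dict String Int :=
  if ev.2.1 == 0 then
    match ev.2.2 with
    | some value =>
      match (PySem.Dict.ofList
          [((1 : Int), "m"), (2, "ef_construction"), (3, "ef_runtime")]).get? ev.1 with
      | some nm => d.insert nm value
      | none => d
    | none => d
  else d

theorem skip_eq_tokenizer_offset (data : List Int) (o1 : Nat) (wt : Int) (hwt : (wt == 0) = false) :
    skip_protobuf_field data o1 wt =
      (if wt == 1 then o1 + 8
       else if wt == 2 then
         match read_uvarint data o1 with
         | (some length, o) => o + length.toNat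
         | (none, o) => o
       else if wt == 5 then o1 + 4
       else o1) := by
  rw [skip_protobuf_field, if_neg (by simp_all), varint_eq]

theorem main_eq (data : List Int) :
    ∀ fuel offset (d : PySem.Dict String Int),
    parseLoop data fuel offset d = (fieldEvents data fuel offset).foldl stepB d := by
  intro fuel
  induction fuel with
  | zero => intro offset d; rfl
  | succ fuel ih =>
    intro offset d
    by_cases h : offset < data.length
    · rw [parseLoop, if_pos h, fieldEvents, if_pos h, varint_eq]
      rcases hr : read_uvarint data offset with ⟨tag?, o1⟩
      cases tag? with
      | none => rfl
      | some tag =>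
        dsimp only
        by_cases hwt : (PySem.Int.band tag 7 == 0) = true
        · -- varint field: both sides read the value at o1
          rw [if_pos hwt, varint_eq]
          rcases hv : read_uvarint data o1 with ⟨v, o2⟩
          rw [List.foldl_cons]
          by_cases hf1 : (tag >>> 3 == 1) = true
          · rw [if_pos (by rw [hf1, hwt]; rfl)]
            have hfn : tag >>> 3 = 1 := by simpa using hf1
            cases v with
            | some value =>
              dsimp only
              rw [ih o2]
              congr 1
              simp only [stepB, hwt, if_pos, hfn]
              rfl
            | none =>
              dsimp only
              rw [ih o2]
              congr 1
              simp [stepB, hwt]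
          · rw [if_neg (by simp_all)]
            by_cases hf2 : (tag >>> 3 == 2) = true
            · rw [if_pos (by rw [hf2, hwt]; rfl)]
              have hfn : tag >>> 3 = 2 := by simpa using hf2
              cases v with
              | some value =>
                dsimp only
                rw [ih o2]
                congr 1
                simp only [stepB, hwt, if_pos, hfn]
                rfl
              | none =>
                dsimp only
                rw [ih o2]
                congr 1
                simp [stepB, hwt]
            · rw [if_neg (by simp_all)]
              by_cases hf3 : (tag >>> 3 == 3) = true
              · rw [if_pos (by rw [hf3, hwt]; rfl)]
                have hfn : tag >>> 3 = 3 := by simpa using hf3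
                cases v with
                | some value =>
                  dsimp only
                  rw [ih o2]
                  congr 1
                  simp only [stepB, hwt, if_pos, hfn]
                  rfl
                | none =>
                  dsimp only
                  rw [ih o2]
                  congr 1
                  simp [stepB, hwt]
              · -- unknown varint field: A skips the varint, B records an ignored event
                rw [if_neg (by simp_all)]
                have hskip : skip_protobuf_field data o1 (PySem.Int.band tag 7) = o2 := by
                  rw [skip_protobuf_field, if_pos hwt, varint_eq, hv]
                rw [hskip, ih o2]
                congr 1
                have h1 : tag >>> 3 ≠ 1 := by simpa using hf1
                have h2 : tag >>> 3 ≠ 2 := by simpa using hf2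
                have h3 : tag >>> 3 ≠ 3 := by simpa using hf3
                have hget : (PySem.Dict.ofList
                    [((1 : Int), "m"), (2, "ef_construction"), (3, "ef_runtime")]).get?
                      (tag >>> 3) = none := by
                  have hmk : (PySem.Dict.ofList
                      [((1 : Int), "m"), (2, "ef_construction"), (3, "ef_runtime")])
                      = PySem.Dict.mk
                      [((1 : Int), "m"), (2, "ef_construction"), (3, "ef_runtime")] := by rfl
                  rw [hmk]
                  simp [PySem.Dict.get?_mk_cons, Ne.symm h1, Ne.symm h2, Ne.symm h3]
                  rfl
                cases v with
                | some value => simp [stepB, hwt, hget]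
                | none => simp [stepB, hwt]
        · -- non-varint wire type: A's three conditions are false, both just skip
          rw [if_neg (by simp_all), if_neg (by simp_all), if_neg (by simp_all),
            if_neg (by simp_all), List.foldl_cons]
          rw [skip_eq_tokenizer_offset data o1 (PySem.Int.band tag 7) (by simp_all)]
          rw [ih]
          congr 1
          simp [stepB, hwt]
    · rw [parseLoop, if_neg h, fieldEvents, if_neg h, List.foldl_nil]

-- ===== VERDICT (by name: the statement is the Claim_ definition above) =====
theorem parse_hnsw_algorithm_protobuf_spec : Claim_equal_parse_hnsw_algorithm_protobuf := by
  intro hnsw_data _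
  unfold Spec_parse_hnsw_algorithm_protobuf parse_hnsw_algorithm_protobuf
    parse_hnsw_algorithm_protobuf_alt
  rw [main_eq hnsw_data hnsw_data.length 0]
  rfl
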